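-- pv_equiv track=rewrite | github.com/Saintedts/mindbox_test_task | mindbox.py | groups_qty_from_n
-- ===== SOURCE A (Python) =====
-- def sum_of_digs(n):
--     s = 0
--
--     while n > 0:
--         digit = n % 10
--         s = s + digit
--         n = n // 10
--
--     return s
--
-- def groups_qty_from_n(n_first_id, n_customers):
--     result_dict = {}
--
--     for i in range(n_first_id, n_customers):
--         i_dig_sum = sum_of_digs(i)
--
--         res_from_dict = result_dict.get(i_dig_sum)
--         if res_from_dict is None:
--             result_dict[i_dig_sum] = 1
--         else:
--             result_dict[i_dig_sum] += 1
--
--     return result_dict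
-- ===== SOURCE B (Python) =====
-- def _digit_sum(n):
--     return 0 if n <= 0 else n % 10 + _digit_sum(n // 10)
--
-- def groups_qty_from_n(n_first_id, n_customers):
--     sums = [_digit_sum(i) for i in range(n_first_id, n_customers)]
--     return {k: sums.count(k) for k in dict.fromkeys(sums)}
-- ===== Notes on version B (the rewrite author's own statement) =====
-- stated objective: alternative
-- what changed: B replaces A's single-pass dict of running counters with a map/ordered-dedup/count-per-key decomposition (list of digit sums, first-occurrence keys via dict.fromkeys, count per key) and replaces A's while-loop accumulator digit sum with a recursive one.
import Mathlib
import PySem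

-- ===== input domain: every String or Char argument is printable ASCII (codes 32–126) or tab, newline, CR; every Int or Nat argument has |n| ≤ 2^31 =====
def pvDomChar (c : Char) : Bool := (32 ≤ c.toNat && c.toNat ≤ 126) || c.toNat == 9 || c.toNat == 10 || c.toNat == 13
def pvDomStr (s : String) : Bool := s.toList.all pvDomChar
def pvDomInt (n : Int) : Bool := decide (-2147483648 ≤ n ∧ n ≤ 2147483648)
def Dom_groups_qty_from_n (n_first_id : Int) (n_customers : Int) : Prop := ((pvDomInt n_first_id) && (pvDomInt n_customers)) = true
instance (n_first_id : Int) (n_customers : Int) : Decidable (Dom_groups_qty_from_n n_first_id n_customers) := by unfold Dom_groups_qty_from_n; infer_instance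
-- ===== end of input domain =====

-- B replaces A's single-pass dict-of-counters with map / ordered-dedup / count-per-key
-- and A's while-loop digit sum with a recursive one (objective: alternative, same result).

-- ===== PORT A =====
-- while n > 0: digit = n % 10; s = s + digit; n = n // 10
def sum_of_digs_loop (n s : Int) : Int :=
  if _h : n > 0 then
    sum_of_digs_loop (PySem.Int.floordiv n 10) (s + PySem.Int.mod n 10)
  else s
termination_by n.toNat
decreasing_by
  rw [PySem.Int.floordiv_eq_ediv_of_pos (by omega)]
  omega

def sum_of_digs (n : Int) : Int := sum_of_digs_loop n 0

def groups_qty_from_n (n_first_id : Int) (n_customers : Int) : List (Int × Int) :=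
  ((PySem.List.pyRange n_first_id n_customers 1).foldl
    (fun result_dict i =>
      let i_dig_sum := sum_of_digs i
      match PySem.Dict.get? result_dict i_dig_sum with
      | none => PySem.Dict.insert result_dict i_dig_sum (1 : Int)
      | some v => PySem.Dict.insert result_dict i_dig_sum (v + 1))
    PySem.Dict.empty).items

-- ===== PORT B =====
def digit_sum_alt (n : Int) : Int :=
  if _h : n ≤ 0 then 0
  else PySem.Int.mod n 10 + digit_sum_alt (PySem.Int.floordiv n 10)
termination_by n.toNat
decreasing_by
  rw [PySem.Int.floordiv_eq_ediv_of_pos (by omega)]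
  omega

def groups_qty_from_n_alt (n_first_id : Int) (n_customers : Int) : List (Int × Int) :=
  let sums := (PySem.List.pyRange n_first_id n_customers 1).map digit_sum_alt
  (PySem.List.dedup sums).map (fun k => (k, (PySem.List.count sums k : Int)))

-- ===== PRECONDITION & SPEC =====
def Spec_groups_qty_from_n (n_first_id : Int) (n_customers : Int) (out : List (Int × Int)) : Prop := out = groups_qty_from_n_alt n_first_id n_customers
instance (n_first_id : Int) (n_customers : Int) (out : List (Int × Int)) : Decidable (Spec_groups_qty_from_n n_first_id n_customers out) := by unfold Spec_groups_qty_from_n; infer_instance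

-- ===== CLAIM (what is proved, stated in full; the proofs are below) =====
def Claim_equal_groups_qty_from_n : Prop := ∀ (n_first_id : Int) (n_customers : Int), Dom_groups_qty_from_n n_first_id n_customers → Spec_groups_qty_from_n n_first_id n_customers (groups_qty_from_n n_first_id n_customers)

-- ===== LEMMAS AND PROOFS =====
theorem sum_of_digs_loop_eq (n : Int) (s : Int) :
    sum_of_digs_loop n s = s + digit_sum_alt n := by
  rw [sum_of_digs_loop, digit_sum_alt]
  split_ifs with h h' <;>
    first
      | omega
      | (rw [sum_of_digs_loop_eq]; ring)
termination_by n.toNat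
decreasing_by
  rw [PySem.Int.floordiv_eq_ediv_of_pos (by omega)]
  omega

theorem sum_of_digs_eq (n : Int) : sum_of_digs n = digit_sum_alt n := by
  rw [sum_of_digs, sum_of_digs_loop_eq]; ring

theorem step_eq_counter_step (d : PySem.Dict Int Int) (k : Int) :
    (match PySem.Dict.get? d k with
     | none => PySem.Dict.insert d k (1 : Int)
     | some v => PySem.Dict.insert d k (v + 1)) =
    PySem.Dict.insert d k (d.getD k 0 + 1) := by
  cases h : PySem.Dict.get? d k <;> simp [PySem.Dict.getD, h]

-- ===== VERDICT (by name: the statement is the Claim_ definition above) =====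
theorem groups_qty_from_n_spec : Claim_equal_groups_qty_from_n := by
  intro a b _
  unfold Spec_groups_qty_from_n groups_qty_from_n groups_qty_from_n_alt
  have hsums : (PySem.List.pyRange a b 1).map sum_of_digs
      = (PySem.List.pyRange a b 1).map digit_sum_alt :=
    List.map_congr_left (fun i _ => sum_of_digs_eq i)
  calc ((PySem.List.pyRange a b 1).foldl
          (fun d i =>
            let s := sum_of_digs i
            match PySem.Dict.get? d s with
            | none => PySem.Dict.insert d s (1 : Int)
            | some v => PySem.Dict.insert d s (v + 1))
          PySem.Dict.empty).items
      = (((PySem.List.pyRange a b 1).map sum_of_digs).foldl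
          (fun d x => PySem.Dict.insert d x (d.getD x (0 : Int) + 1))
          PySem.Dict.empty).items := by
        rw [List.foldl_map]
        congr 1
        congr 1
        funext d i
        exact step_eq_counter_step d (sum_of_digs i)
    _ = (PySem.Dict.counter ((PySem.List.pyRange a b 1).map digit_sum_alt)).items := by
        rw [hsums, PySem.Dict.foldl_insert_getD_add_one_eq_counter]
    _ = (PySem.List.dedup ((PySem.List.pyRange a b 1).map digit_sum_alt)).map
          (fun k => (k, (PySem.List.count ((PySem.List.pyRange a b 1).map digit_sum_alt) k : Int))) := by
        rw [PySem.Dict.items_counter, PySem.List.dedup_eq_ofList]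
        simp [PySem.List.count_eq]
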